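-- pv_equiv track=rewrite | github.com/stanford-futuredata/parallel-lb-simulator | unusedLogs/scatterPlot.py | count_all_clusters
-- ===== SOURCE A (Python) =====
-- from collections import Counter
--
-- NUM_SERVERS = 5
--
-- SHARDS_PER_SERVER = 20
--
-- QUERY_SIZE = 3
--
-- def count_all_clusters(shards):
--     shards = sorted(shards)
--     cluster_counts = Counter()
--     for index, start_shard in enumerate(shards):
--         current_distance = 1
--         current_shard_index = index
--         current_cluster_size = 1
--
--         while current_distance <= QUERY_SIZE:
--             cluster_counts[current_cluster_size] += 1
--
--             prev_shard = shards[current_shard_index]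
--
--             current_shard_index += 1
--             current_cluster_size += 1
--
--
--
--             if current_shard_index >= len(shards):
--                 current_shard_index = 0
--                 current_distance += shards[0] + NUM_SERVERS * SHARDS_PER_SERVER - prev_shard
--             else:
--                 current_distance += shards[current_shard_index] - prev_shard
--
--     return cluster_counts
-- ===== SOURCE B (Python) =====
-- from collections import Counter
--
-- NUM_SERVERS = 5
--
-- SHARDS_PER_SERVER = 20
--
-- QUERY_SIZE = 3
--
-- RING = NUM_SERVERS * SHARDS_PER_SERVER
--
--
-- def _first_above(arr, lo, hi, c):
--     # smallest index j in [lo, hi) with arr[j] > c, or hi if none (arr sorted)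
--     while lo < hi:
--         mid = (lo + hi) // 2
--         if arr[mid] > c:
--             hi = mid
--         else:
--             lo = mid + 1
--     return lo
--
--
-- def _cluster_len(arr, n, i):
--     # walk length from start i: first t >= 1 whose ring position lies more than
--     # QUERY_SIZE - 1 past position i (positions wrap around the ring of size RING)
--     j = _first_above(arr, i + 1, n, arr[i] + QUERY_SIZE - 1)
--     if j < n:
--         return j - i
--     m = _first_above(arr, 0, n, arr[i] + QUERY_SIZE - 1 - RING)
--     return n + m - i
--
--
-- def count_all_clusters(shards):
--     arr = sorted(shards)
--     n = len(arr)
--     ks = []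
--     for i in range(n):
--         ks.append(_cluster_len(arr, n, i))
--     # suffix counts: cluster_counts[s] = number of starts whose walk length is >= s
--     freq = Counter(ks)
--     counts = Counter()
--     running = n
--     s = 1
--     while running > 0:
--         counts[s] = running
--         running -= freq[s]
--         s += 1
--     return counts
-- ===== Notes on version B (the rewrite author's own statement) =====
-- stated objective: faster
-- what changed: A walks the ring shard-by-shard from every start while updating the Counter in place; B sorts once, gets each start's walk length with two binary searches on the sorted list (second one for the wrap-around), and fills the Counter by a suffix-count sweep.
import Mathlib
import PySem

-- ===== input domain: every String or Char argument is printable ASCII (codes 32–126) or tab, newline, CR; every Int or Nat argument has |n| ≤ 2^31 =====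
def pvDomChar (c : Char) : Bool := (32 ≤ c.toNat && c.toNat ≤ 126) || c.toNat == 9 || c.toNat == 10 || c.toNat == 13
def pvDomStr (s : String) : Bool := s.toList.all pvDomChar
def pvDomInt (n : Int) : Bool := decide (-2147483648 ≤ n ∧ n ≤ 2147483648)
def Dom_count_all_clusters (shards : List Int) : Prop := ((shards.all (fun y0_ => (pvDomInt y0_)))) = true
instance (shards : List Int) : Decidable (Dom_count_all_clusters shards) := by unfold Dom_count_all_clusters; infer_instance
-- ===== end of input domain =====

-- B replaces A's per-start circular walk over the sorted shard list by two binary searches per start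
-- (walk lengths) plus a suffix-count fill of the Counter; same return value on every input.

-- ===== PORT A =====
def pvNUM_SERVERS : Int := 5
def pvSHARDS_PER_SERVER : Int := 20
def pvQUERY_SIZE : Int := 3

-- A's inner 'while' loop; the fuel only makes the loop structural (it provably runs ≤ arr.length
-- times, and it is always called with fuel arr.length + 1, so the 0-fuel branch is never reached).
def pvInnerA (arr : List Int) : Nat → Int → Int → Int → PySem.Dict Int Int → PySem.Dict Int Int
  | 0, _, _, _, cnt => cnt
  | fuel + 1, d, j, s, cnt =>
    if d ≤ pvQUERY_SIZE then
      let cnt' := cnt.modify s 0 (· + 1)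
      let prev := PySem.List.pyGetD arr j 0
      let j' := j + 1
      let s' := s + 1
      if j' ≥ (arr.length : Int) then
        pvInnerA arr fuel (d + (PySem.List.pyGetD arr 0 0 + pvNUM_SERVERS * pvSHARDS_PER_SERVER - prev)) 0 s' cnt'
      else
        pvInnerA arr fuel (d + (PySem.List.pyGetD arr j' 0 - prev)) j' s' cnt'
    else cnt

def count_all_clusters (shards : List Int) : List (Int × Int) :=
  let arr := PySem.List.sorted shards (fun x => x) false
  let cnt := (PySem.List.enumerate arr 0).foldl
    (fun cnt p => pvInnerA arr (arr.length + 1) 1 p.1 1 cnt) PySem.Dict.empty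
  cnt.items

-- ===== PORT B =====
def pvB_QUERY_SIZE : Int := 3
def pvB_RING : Int := 5 * 20

-- Source B's hand-written binary search: smallest index j in [lo, hi) with arr[j] > c, or hi if none.
def pvFirstAbove (arr : List Int) (lo hi c : Int) : Int :=
  if h : lo < hi then
    if c < PySem.List.pyGetD arr (PySem.Int.floordiv (lo + hi) 2) 0 then
      pvFirstAbove arr lo (PySem.Int.floordiv (lo + hi) 2) c
    else
      pvFirstAbove arr (PySem.Int.floordiv (lo + hi) 2 + 1) hi c
  else lo
termination_by (hi - lo).toNat
decreasing_by
  · have h3 : PySem.Int.floordiv (lo + hi) 2 < hi :=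
      (PySem.Int.floordiv_lt_iff_lt_mul (by norm_num)).mpr (by omega)
    omega
  · have h2 := PySem.Int.floordiv_two_mid_bounds (le_of_lt h)
    omega

-- Source B's _cluster_len helper: the walk length of one start
def pvClusterLen (arr : List Int) (n i : Int) : Int :=
  let j := pvFirstAbove arr (i + 1) n (PySem.List.pyGetD arr i 0 + pvB_QUERY_SIZE - 1)
  if j < n then j - i
  else n + pvFirstAbove arr 0 n (PySem.List.pyGetD arr i 0 + pvB_QUERY_SIZE - 1 - pvB_RING) - i

-- Source B's suffix-count 'while running > 0' loop; fuel is structural only (the loop provably runs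
-- ≤ arr.length times, and it is always called with fuel arr.length + 1).
def pvSuffixLoop (freq : PySem.Dict Int Int) : Nat → Int → Int → PySem.Dict Int Int → PySem.Dict Int Int
  | 0, _, _, counts => counts
  | fuel + 1, running, s, counts =>
    if running > 0 then
      pvSuffixLoop freq fuel (running - freq.getD s 0) (s + 1) (counts.insert s running)
    else counts

def count_all_clusters_alt (shards : List Int) : List (Int × Int) :=
  let arr := PySem.List.sorted shards (fun x => x) false
  let n : Int := (arr.length : Int)
  let ks := (PySem.List.pyRange 0 n 1).foldl (fun acc i => acc ++ [pvClusterLen arr n i]) []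
  let freq := PySem.Dict.counter ks
  (pvSuffixLoop freq (arr.length + 1) n 1 PySem.Dict.empty).items

-- ===== PRECONDITION & SPEC =====
def Spec_count_all_clusters (shards : List Int) (out : List (Int × Int)) : Prop := out = count_all_clusters_alt shards
instance (shards : List Int) (out : List (Int × Int)) : Decidable (Spec_count_all_clusters shards out) := by unfold Spec_count_all_clusters; infer_instance

-- ===== CLAIM (what is proved, stated in full; the proofs are below) =====
def Claim_equal_count_all_clusters : Prop := ∀ (shards : List Int), Dom_count_all_clusters shards → Spec_count_all_clusters shards (count_all_clusters shards)

-- ===== LEMMAS AND PROOFS =====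

-- Ring position of the m-th shard when the sorted list is walked twice around the ring of size 100.
def posF (arr : List Int) (m : Nat) : Int :=
  if m < arr.length then arr.getD m 0 else arr.getD (m - arr.length) 0 + 100

-- Walk length from start i: first t ≥ 1 whose position is more than QUERY_SIZE - 1 = 2 past posF i.
def kN (arr : List Int) (i : Nat) : Nat :=
  (List.range arr.length).findIdx (fun t => decide (posF arr i + 2 < posF arr (i + t + 1))) + 1

def ksN (arr : List Int) : List Nat := (List.range arr.length).map (kN arr)
def KK (arr : List Int) : Nat := (ksN arr).foldl max 0
def CC (arr : List Int) (t : Nat) : Int := ((ksN arr).countP (fun k => decide (t ≤ k)) : Int)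

-- the common normal form both ports are proved equal to
def canon (arr : List Int) : List (Int × Int) :=
  (List.range (KK arr)).map (fun (s : Nat) => (1 + (s : Int), CC arr (s + 1)))

-- A's index variable as a function of start i and offset u.
def pvJ (arr : List Int) (i u : Nat) : Int :=
  if i + u < arr.length then ((i + u : Nat) : Int) else ((i + u - arr.length : Nat) : Int)

-- bump keys s, s+1, …, s+m-1 by one each (the effect of A's inner loop on the Counter)
def bumps (cnt : PySem.Dict Int Int) (s : Int) : Nat → PySem.Dict Int Int
  | 0 => cnt
  | m + 1 => bumps (cnt.modify s 0 (· + 1)) (s + 1) m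

theorem kN_pos (arr : List Int) (i : Nat) : 1 ≤ kN arr i := Nat.le_add_left 1 _

theorem findIdx_lt (arr : List Int) (i : Nat) (hi : i < arr.length) :
    (List.range arr.length).findIdx (fun t => decide (posF arr i + 2 < posF arr (i + t + 1))) < arr.length := by
  have hlen : (List.range arr.length).length = arr.length := List.length_range
  have hw : (arr.length - 1) ∈ List.range arr.length := List.mem_range.mpr (by omega)
  have hp : (fun t => decide (posF arr i + 2 < posF arr (i + t + 1))) (arr.length - 1) = true := by
    have h1 : i + (arr.length - 1) + 1 = i + arr.length := by omega
    simp only [h1, decide_eq_true_eq]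
    unfold posF
    have h2 : ¬ (i + arr.length < arr.length) := by omega
    simp only [if_neg h2, if_pos hi]
    have h3 : i + arr.length - arr.length = i := by omega
    rw [h3]; omega
  have := List.findIdx_lt_length_of_exists (p := fun t => decide (posF arr i + 2 < posF arr (i + t + 1))) ⟨_, hw, hp⟩
  omega

theorem kN_le (arr : List Int) (i : Nat) (hi : i < arr.length) :
    kN arr i ≤ arr.length := by
  have := findIdx_lt arr i hi
  unfold kN; omega

theorem kN_hit (arr : List Int) (i : Nat) (hi : i < arr.length) :
    posF arr i + 2 < posF arr (i + kN arr i) := by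
  have h := findIdx_lt arr i hi
  have h2 : ((List.range arr.length).findIdx (fun t => decide (posF arr i + 2 < posF arr (i + t + 1)))) < (List.range arr.length).length := by
    simpa using h
  have := List.findIdx_getElem (w := h2)
  simp only [List.getElem_range, decide_eq_true_eq] at this
  unfold kN
  rw [← Nat.add_assoc]
  exact this

theorem kN_miss (arr : List Int) (i u : Nat) (hi : i < arr.length) (hu : u < kN arr i) :
    posF arr (i + u) ≤ posF arr i + 2 := by
  rcases Nat.eq_zero_or_pos u with h | h
  · subst h; simp only [Nat.add_zero]; omega
  · have hlt : u - 1 < (List.range arr.length).findIdx (fun t => decide (posF arr i + 2 < posF arr (i + t + 1))) := by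
      unfold kN at hu; omega
    have := List.not_of_lt_findIdx hlt
    have hlen : u - 1 < (List.range arr.length).length := by
      have := findIdx_lt arr i hi
      simp only [List.length_range]; omega
    rw [List.getElem_range] at this
    have h1 : i + (u - 1) + 1 = i + u := by omega
    rw [h1] at this
    simp at this
    omega

theorem kN_eq_of (arr : List Int) (i k : Nat) (hi : i < arr.length)
    (hgt : posF arr i + 2 < posF arr (i + k))
    (hle : ∀ t, 1 ≤ t → t < k → posF arr (i + t) ≤ posF arr i + 2) :
    kN arr i = k := by
  by_contra hne
  rcases Nat.lt_or_ge (kN arr i) k with h | h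
  · have := hle (kN arr i) (by unfold kN; omega) h
    have := kN_hit arr i hi
    omega
  · have hlt : k < kN arr i := by omega
    have := kN_miss arr i k hi hlt
    omega

theorem innerA_eq (arr : List Int) (i : Nat) (hi : i < arr.length) :
    ∀ m u fuel (cnt : PySem.Dict Int Int), u + m = kN arr i → m < fuel →
    pvInnerA arr fuel (1 + posF arr (i + u) - posF arr i) (pvJ arr i u) ((u : Int) + 1) cnt
      = bumps cnt ((u : Int) + 1) m := by
  intro m
  induction m with
  | zero =>
    intro u fuel cnt hsum hfuel
    obtain ⟨f, rfl⟩ : ∃ f, fuel = f + 1 := ⟨fuel - 1, by omega⟩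
    have hhit := kN_hit arr i hi
    have hu : u = kN arr i := by omega
    subst hu
    simp only [pvInnerA, bumps, pvQUERY_SIZE]
    rw [if_neg (by omega)]
  | succ m ih =>
    intro u fuel cnt hsum hfuel
    obtain ⟨f, rfl⟩ : ∃ f, fuel = f + 1 := ⟨fuel - 1, by omega⟩
    have hkle := kN_le arr i hi
    have hukn : u < kN arr i := by omega
    have hun : u < arr.length := by omega
    have hcond : posF arr (i + u) ≤ posF arr i + 2 := by
      rcases Nat.eq_zero_or_pos u with h0 | h0
      · subst h0; simp only [Nat.add_zero]; omega
      · exact kN_miss arr i u hi hukn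
    simp only [pvInnerA, pvQUERY_SIZE, pvNUM_SERVERS, pvSHARDS_PER_SERVER]
    rw [if_pos (by omega)]
    have hscast : (u : Int) + 1 + 1 = ((u + 1 : Nat) : Int) + 1 := by push_cast; ring
    by_cases hA : i + u < arr.length
    · have hprev : PySem.List.pyGetD arr (pvJ arr i u) 0 = posF arr (i + u) := by
        rw [pvJ, if_pos hA, PySem.List.pyGetD_natCast, posF, if_pos hA]
      by_cases hB : i + u + 1 < arr.length
      · rw [if_neg (by rw [pvJ, if_pos hA]; push_cast; omega)]
        have hj' : pvJ arr i u + 1 = pvJ arr i (u + 1) := by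
          rw [pvJ, if_pos hA, pvJ, if_pos (by omega)]; push_cast; ring
        have hp1 : posF arr (i + (u + 1)) = arr.getD (i + (u + 1)) 0 := by
          rw [posF, if_pos (by omega)]
        have hd' : 1 + posF arr (i + u) - posF arr i + (PySem.List.pyGetD arr (pvJ arr i u + 1) 0 - PySem.List.pyGetD arr (pvJ arr i u) 0)
            = 1 + posF arr (i + (u + 1)) - posF arr i := by
          rw [hprev, hj', pvJ, if_pos (by omega), PySem.List.pyGetD_natCast, hp1]
          ring
        rw [hd', hj', hscast, ih (u + 1) f _ (by omega) (by omega)]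
        simp only [bumps]; rw [hscast]
      · -- wrap: i + u + 1 = arr.length
        have hn : i + u + 1 = arr.length := by omega
        rw [if_pos (by rw [pvJ, if_pos hA]; push_cast; omega)]
        have hz : PySem.List.pyGetD arr 0 0 = arr.getD 0 0 := by
          have : (0 : Int) = ((0 : Nat) : Int) := rfl
          rw [this, PySem.List.pyGetD_natCast]
        have hd' : 1 + posF arr (i + u) - posF arr i + (PySem.List.pyGetD arr 0 0 + 5 * 20 - PySem.List.pyGetD arr (pvJ arr i u) 0)
            = 1 + posF arr (i + (u + 1)) - posF arr i := by
          rw [hprev, hz]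
          have h1 : posF arr (i + (u + 1)) = arr.getD 0 0 + 100 := by
            rw [posF, if_neg (by omega)]
            have : i + (u + 1) - arr.length = 0 := by omega
            rw [this]
          rw [h1]; ring
        have hj' : pvJ arr i (u + 1) = (0 : Int) := by
          rw [pvJ, if_neg (by omega)]
          have : i + (u + 1) - arr.length = 0 := by omega
          rw [this]; rfl
        have hI := ih (u + 1) f (cnt.modify ((u : Int) + 1) 0 (· + 1)) (by omega) (by omega)
        rw [hj'] at hI
        simp only [bumps]
        rw [hd', hscast, hI]
    · -- already wrapped: i + u ≥ arr.length
      have hin : 1 ≤ i := by omega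
      have hlt : i + u - arr.length < arr.length := by omega
      have hprev : PySem.List.pyGetD arr (pvJ arr i u) 0 = posF arr (i + u) - 100 := by
        rw [pvJ, if_neg hA, PySem.List.pyGetD_natCast, posF, if_neg hA]; ring
      have hj' : pvJ arr i u + 1 = pvJ arr i (u + 1) := by
        rw [pvJ, if_neg hA, pvJ, if_neg (by omega)]
        have : i + (u + 1) - arr.length = (i + u - arr.length) + 1 := by omega
        rw [this]; push_cast; ring
      rw [if_neg (by rw [pvJ, if_neg hA]; omega)]
      have hp1 : posF arr (i + (u + 1)) = arr.getD (i + (u + 1) - arr.length) 0 + 100 := by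
        rw [posF, if_neg (by omega)]
      have hd' : 1 + posF arr (i + u) - posF arr i + (PySem.List.pyGetD arr (pvJ arr i u + 1) 0 - PySem.List.pyGetD arr (pvJ arr i u) 0)
          = 1 + posF arr (i + (u + 1)) - posF arr i := by
        rw [hprev, hj', pvJ, if_neg (by omega), PySem.List.pyGetD_natCast, hp1]
        ring
      rw [hd', hj', hscast, ih (u + 1) f _ (by omega) (by omega)]
      simp only [bumps]; rw [hscast]

theorem bumps_eq_fold (m : Nat) : ∀ (cnt : PySem.Dict Int Int) (s : Int),
    bumps cnt s m = (PySem.List.pyRange s (s + (m : Int)) 1).foldl (fun c x => c.modify x 0 (· + 1)) cnt := by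
  induction m with
  | zero => intro cnt s; rw [bumps]; simp [PySem.List.pyRange_one_eq_nil]
  | succ m ih =>
    intro cnt s
    rw [bumps, ih]
    have hb : s + ((m + 1 : Nat) : Int) = s + 1 + (m : Int) := by push_cast; ring
    rw [hb, PySem.List.pyRange_one_cons (show s < s + 1 + (m : Int) by omega)]
    simp only [List.foldl_cons]

theorem pyRange_self_update (K : Int) (l : PySem.Set Int)
    (hsub : ∀ x ∈ l, x ∈ PySem.List.pyRange 1 (1 + K) 1) (hnd : l.Nodup) :
    PySem.Set.update (PySem.List.pyRange 1 (1 + K) 1) l = PySem.List.pyRange 1 (1 + K) 1 := by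
  rw [PySem.Set.update_eq_append_filter, PySem.Set.ofList_eq_self_of_nodup _ hnd]
  have : l.filter (fun y => !(PySem.Set.contains (PySem.List.pyRange 1 (1 + K) 1) y)) = [] := by
    apply List.filter_eq_nil_iff.mpr
    intro x hx
    simp [PySem.Set.contains_eq_listContains, (hsub x hx)]
  rw [this, List.append_nil]

theorem rangeSet (K k : Nat) :
    PySem.Set.update (PySem.List.pyRange 1 (1 + (K : Int)) 1) (PySem.List.pyRange 1 (1 + (k : Int)) 1)
      = PySem.List.pyRange 1 (1 + (max K k : Int)) 1 := by
  rcases Nat.lt_or_ge K k with h | h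
  · have hmax : (1 : Int) + max (K : Int) (k : Int) = 1 + (k : Int) := by omega
    rw [hmax]
    rw [PySem.List.pyRange_one_append 1 (1 + (K:Int)) (1 + (k:Int)) (by omega) (by omega),
        PySem.Set.update_append]
    rw [pyRange_self_update _ _ (fun x hx => hx) (PySem.List.nodup_pyRange_one _ _)]
    rw [PySem.Set.update_eq_append_of_disjoint _ _ (PySem.List.nodup_pyRange_one _ _)
          (by intro x hx hx2
              have h1 := PySem.List.mem_pyRange_one.mp hx
              have h2 := PySem.List.mem_pyRange_one.mp hx2
              omega)]
  · have hmax : (1 : Int) + max (K : Int) (k : Int) = 1 + (K : Int) := by omega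
    rw [hmax]
    apply pyRange_self_update
    · intro x hx
      have := PySem.List.mem_pyRange_one.mp hx
      exact PySem.List.mem_pyRange_one.mpr (by omega)
    · exact PySem.List.nodup_pyRange_one _ _

theorem keys_bumps (cnt : PySem.Dict Int Int) (k : Nat) :
    (bumps cnt 1 k).keys = PySem.Set.update cnt.keys (PySem.List.pyRange 1 (1 + (k : Int)) 1) := by
  rw [bumps_eq_fold]
  have := PySem.Dict.keys_foldl_modify (PySem.List.pyRange 1 (1 + (k:Int)) 1) (0 : Int) (fun _ _ v => v + 1) cnt
  rw [show (1 : Int) + (k : Int) = (1 : Int) + (k : Int) from rfl]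
  simpa using this

theorem getD_bumps (cnt : PySem.Dict Int Int) (k : Nat) (v : Int) :
    (bumps cnt 1 k).getD v 0 = cnt.getD v 0 + ((PySem.List.pyRange 1 (1 + (k : Int)) 1).count v : Int) := by
  rw [bumps_eq_fold]
  simpa using PySem.Dict.getD_foldl_modify_add_one (PySem.List.pyRange 1 (1 + (k:Int)) 1) cnt v

theorem foldBumps_keys (l : List Nat) :
    (l.foldl (fun cnt k => bumps cnt 1 k) PySem.Dict.empty).keys
      = PySem.List.pyRange 1 (1 + ((l.foldl max 0 : Nat) : Int)) 1 := by
  induction l using List.reverseRecOn with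
  | nil => simp [PySem.List.pyRange_one_eq_nil]
  | append_singleton l k ih =>
    rw [List.foldl_append, List.foldl_append]
    simp only [List.foldl_cons, List.foldl_nil]
    rw [keys_bumps, ih, rangeSet]
    push_cast
    ring_nf

theorem foldBumps_getD (l : List Nat) (v : Int) :
    (l.foldl (fun cnt k => bumps cnt 1 k) PySem.Dict.empty).getD v 0
      = ((l.countP (fun (k : Nat) => decide (1 ≤ v ∧ v ≤ (k : Int))) : Nat) : Int) := by
  induction l using List.reverseRecOn with
  | nil => simp [PySem.Dict.getD_empty]
  | append_singleton l k ih =>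
    rw [List.foldl_append, List.countP_append]
    simp only [List.foldl_cons, List.foldl_nil, List.countP_cons, List.countP_nil]
    rw [getD_bumps, ih]
    have hcnt : (PySem.List.pyRange 1 (1 + (k : Int)) 1).count v = (if 1 ≤ v ∧ v ≤ (k : Int) then 1 else 0) := by
      by_cases hv : 1 ≤ v ∧ v ≤ (k : Int)
      · rw [if_pos hv]
        exact List.count_eq_one_of_mem (PySem.List.nodup_pyRange_one _ _)
          (PySem.List.mem_pyRange_one.mpr (by omega))
      · rw [if_neg hv]
        exact List.count_eq_zero.mpr (fun hmem => hv (by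
          have := PySem.List.mem_pyRange_one.mp hmem; omega))
    rw [hcnt]
    by_cases hv : 1 ≤ v ∧ v ≤ (k : Int) <;> simp [hv]

theorem dictA_items (arr : List Int) :
    ((List.range arr.length).foldl (fun cnt i => bumps cnt 1 (kN arr i)) PySem.Dict.empty).items
      = canon arr := by
  have hfold : (List.range arr.length).foldl (fun cnt i => bumps cnt 1 (kN arr i)) PySem.Dict.empty
      = (ksN arr).foldl (fun cnt k => bumps cnt 1 k) PySem.Dict.empty := by
    rw [ksN, List.foldl_map]
  rw [hfold]
  have hkeys := foldBumps_keys (ksN arr)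
  have hnd : ((ksN arr).foldl (fun cnt k => bumps cnt 1 k) PySem.Dict.empty).keys.Nodup := by
    rw [hkeys]; exact PySem.List.nodup_pyRange_one _ _
  rw [PySem.Dict.items_eq_map_keys _ hnd 0, hkeys]
  rw [show (List.foldl max 0 (ksN arr)) = KK arr from rfl]
  rw [PySem.List.pyRange_one 1 (1 + ((KK arr : Nat) : Int))]
  have : ((1 : Int) + (KK arr : Int) - 1).toNat = KK arr := by omega
  rw [this, List.map_map, canon]
  apply List.map_congr_left
  intro s hs
  simp only [Function.comp_apply]
  have h1 : (1 : Int) + (s : Int) = 1 + (s : Int) := rfl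
  rw [foldBumps_getD]
  have hcp : (ksN arr).countP (fun (k : Nat) => decide (1 ≤ 1 + (s : Int) ∧ 1 + (s : Int) ≤ (k : Int)))
      = (ksN arr).countP (fun (k : Nat) => decide (s + 1 ≤ k)) := by
    apply List.countP_congr
    intro k _
    simp only [decide_eq_true_eq]
    constructor
    · intro ⟨_, h⟩; omega
    · intro h
      constructor
      · omega
      · exact_mod_cast (by omega : ((1 : Int) + (s : Int) ≤ (k : Int)))
  simp only [CC]
  rw [hcp]

theorem A_eq_canon (shards : List Int) :
    count_all_clusters shards = canon (PySem.List.sorted shards (fun x => x) false) := by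
  unfold count_all_clusters
  set arr := PySem.List.sorted shards (fun x => x) false with harr
  simp only []
  have e1 : (PySem.List.enumerate arr 0).foldl (fun cnt (p : Int × Int) => pvInnerA arr (arr.length + 1) 1 p.1 1 cnt) PySem.Dict.empty
      = ((PySem.List.enumerate arr 0).map (fun p => p.1)).foldl (fun cnt j => pvInnerA arr (arr.length + 1) 1 j 1 cnt) PySem.Dict.empty := by
    rw [List.foldl_map]
  rw [e1, PySem.List.map_fst_enumerate arr 0, zero_add, PySem.List.pyRange_one 0 (arr.length : Int)]
  have h1 : (((arr.length : Int)) - 0).toNat = arr.length := by omega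
  rw [h1, List.foldl_map]
  have h2 : (List.range arr.length).foldl (fun cnt (k : Nat) => pvInnerA arr (arr.length + 1) 1 (0 + (k : Int)) 1 cnt) PySem.Dict.empty
      = (List.range arr.length).foldl (fun cnt i => bumps cnt 1 (kN arr i)) PySem.Dict.empty := by
    apply PySem.List.foldl_congr_mem
    intro cnt i hmem
    have hi : i < arr.length := List.mem_range.mp hmem
    have := innerA_eq arr i hi (kN arr i) 0 (arr.length + 1) cnt (by omega)
      (by have := kN_le arr i hi; omega)
    simp only [Nat.add_zero, Nat.cast_zero, zero_add] at this
    have hd : (1 : Int) + posF arr i - posF arr i = 1 := by ring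
    have hj : pvJ arr i 0 = (i : Int) := by rw [pvJ, if_pos (by omega), Nat.add_zero]
    rw [hd, hj] at this
    rw [zero_add, this]
  rw [h2, dictA_items]

theorem firstAbove_spec (arr : List Int) (hp : arr.Pairwise (· ≤ ·)) :
    ∀ (lo hi c : Int), 0 ≤ lo → lo ≤ hi → hi ≤ (arr.length : Int) →
    lo ≤ pvFirstAbove arr lo hi c ∧ pvFirstAbove arr lo hi c ≤ hi ∧
    (∀ m : Nat, lo ≤ (m : Int) → (m : Int) < pvFirstAbove arr lo hi c → arr.getD m 0 ≤ c) ∧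
    (pvFirstAbove arr lo hi c < hi → c < arr.getD (pvFirstAbove arr lo hi c).toNat 0) := by
  intro lo hi c
  fun_induction pvFirstAbove arr lo hi c with
  | case1 lo hi h hcond ih =>
    intro h0 hlh hhn
    have hmid := PySem.Int.floordiv_two_mid_bounds (le_of_lt h)
    have hmlt : PySem.Int.floordiv (lo + hi) 2 < hi :=
      (PySem.Int.floordiv_lt_iff_lt_mul (by norm_num)).mpr (by omega)
    obtain ⟨i1, i2, i3, i4⟩ := ih h0 hmid.1 (by omega)
    refine ⟨i1, by omega, i3, ?_⟩
    intro hr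
    rcases lt_or_ge (pvFirstAbove arr lo (PySem.Int.floordiv (lo + hi) 2) c) (PySem.Int.floordiv (lo + hi) 2) with hc | hc
    · exact i4 hc
    · have he : pvFirstAbove arr lo (PySem.Int.floordiv (lo + hi) 2) c = PySem.Int.floordiv (lo + hi) 2 := by omega
      rw [he]
      rw [PySem.List.pyGetD_eq_getElem arr 0 (by omega) (by omega)] at hcond
      rw [List.getD_eq_getElem _ _ (by omega)]
      exact hcond
  | case2 lo hi h hcond ih =>
    intro h0 hlh hhn
    have hmid := PySem.Int.floordiv_two_mid_bounds (le_of_lt h)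
    have hmlt : PySem.Int.floordiv (lo + hi) 2 < hi :=
      (PySem.Int.floordiv_lt_iff_lt_mul (by norm_num)).mpr (by omega)
    obtain ⟨i1, i2, i3, i4⟩ := ih (by omega) (by omega) hhn
    refine ⟨by omega, i2, ?_, i4⟩
    intro m hm1 hm2
    rcases lt_or_ge (m : Int) (PySem.Int.floordiv (lo + hi) 2 + 1) with hc | hc
    · -- m ≤ mid: arr[m] ≤ arr[mid] ≤ c
      have hmn : (PySem.Int.floordiv (lo + hi) 2).toNat < arr.length := by omega
      have hmidle : arr[(PySem.Int.floordiv (lo + hi) 2).toNat] ≤ c := by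
        rw [PySem.List.pyGetD_eq_getElem arr 0 (by omega) (by omega)] at hcond
        omega
      have hmlen : m < arr.length := by omega
      rw [List.getD_eq_getElem _ _ hmlen]
      rcases Nat.lt_or_ge m (PySem.Int.floordiv (lo + hi) 2).toNat with hlt | hge
      · have hple := List.pairwise_iff_getElem.mp hp m _ hmlen hmn hlt
        exact le_trans hple hmidle
      · have hme : m = (PySem.Int.floordiv (lo + hi) 2).toNat := by omega
        subst hme
        exact hmidle
    · exact i3 m hc hm2
  | case3 lo hi h =>
    intro h0 hlh hhn
    exact ⟨le_refl _, hlh, fun m hm1 hm2 => absurd (lt_of_le_of_lt hm1 hm2) (lt_irrefl _), fun hlt => absurd (lt_of_le_of_lt (le_refl lo) hlt) h⟩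

theorem ks_elem (arr : List Int) (hp : arr.Pairwise (· ≤ ·)) (i : Nat) (hi : i < arr.length) :
    pvClusterLen arr (arr.length : Int) (i : Int) = (kN arr i : Int) := by
  have hgi : PySem.List.pyGetD arr (i : Int) 0 = arr.getD i 0 := PySem.List.pyGetD_natCast arr i 0
  have hposi : posF arr i = arr.getD i 0 := by rw [posF, if_pos hi]
  unfold pvClusterLen
  simp only [pvB_QUERY_SIZE, pvB_RING, hgi]
  have hc2 : arr.getD i 0 + 3 - 1 = arr.getD i 0 + 2 := by ring
  have hc3 : arr.getD i 0 + 2 - 5 * 20 = arr.getD i 0 + 2 - 100 := by ring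
  rw [hc2, hc3]
  obtain ⟨s1, s2, s3, s4⟩ := firstAbove_spec arr hp ((i : Int) + 1) (arr.length : Int) (arr.getD i 0 + 2)
    (by omega) (by omega) (le_refl _)
  set j := pvFirstAbove arr ((i : Int) + 1) (arr.length : Int) (arr.getD i 0 + 2) with hj
  by_cases hjn : j < (arr.length : Int)
  · rw [if_pos hjn]
    have hk := kN_eq_of arr i (j.toNat - i) hi
      (by
        have h1 : i + (j.toNat - i) = j.toNat := by omega
        rw [h1, hposi, posF, if_pos (by omega)]
        exact (by rw [List.getD_eq_getElem _ _ (by omega)] at s4 ⊢; exact s4 hjn) )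
      (by
        intro t h1 ht
        have h2 : i + t < arr.length := by omega
        rw [posF, if_pos h2, hposi]
        exact s3 (i + t) (by push_cast; omega) (by push_cast; omega))
    rw [hk]; omega
  · rw [if_neg hjn]
    have hjeq : j = (arr.length : Int) := by omega
    obtain ⟨u1, u2, u3, u4⟩ := firstAbove_spec arr hp 0 (arr.length : Int) (arr.getD i 0 + 2 - 100)
      (le_refl _) (by omega) (le_refl _)
    set m2 := pvFirstAbove arr 0 (arr.length : Int) (arr.getD i 0 + 2 - 100) with hm2
    have hm2i : m2 ≤ (i : Int) := by
      by_contra hcon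
      have := u3 i (by omega) (by omega)
      omega
    have hm2lt : m2 < (arr.length : Int) := by omega
    have hu4 := u4 hm2lt
    have hk := kN_eq_of arr i (arr.length + m2.toNat - i) hi
      (by
        have h1 : i + (arr.length + m2.toNat - i) = arr.length + m2.toNat := by omega
        rw [h1, hposi, posF, if_neg (by omega)]
        have h2 : arr.length + m2.toNat - arr.length = m2.toNat := by omega
        rw [h2]
        rw [List.getD_eq_getElem _ _ (by omega)] at hu4 ⊢
        omega)
      (by
        intro t h1 ht
        rw [hposi]
        by_cases h2 : i + t < arr.length
        · rw [posF, if_pos h2]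
          exact s3 (i + t) (by push_cast; omega) (by push_cast; omega)
        · rw [posF, if_neg h2]
          have h3 := u3 (i + t - arr.length) (by omega) (by omega)
          omega)
    rw [hk]; omega

theorem le_foldl_max_nat (l : List Nat) : ∀ (a : Nat), (∀ x ∈ l, x ≤ l.foldl max a) ∧ a ≤ l.foldl max a := by
  induction l with
  | nil => intro a; exact ⟨by simp, le_refl _⟩
  | cons b t ih =>
    intro a
    simp only [List.foldl_cons]
    obtain ⟨h1, h2⟩ := ih (max a b)
    exact ⟨fun x hx => by
      rcases List.mem_cons.mp hx with h | h
      · subst h; omega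
      · exact h1 x h, by omega⟩

theorem foldl_max_le_nat (l : List Nat) : ∀ (a q : Nat), (∀ x ∈ l, x ≤ q) → a ≤ q → l.foldl max a ≤ q := by
  induction l with
  | nil => intro a q _ h; simpa using h
  | cons b t ih =>
    intro a q h ha
    simp only [List.foldl_cons]
    exact ih _ q (fun x hx => h x (by simp [hx])) (by have := h b (by simp); omega)

theorem countP_split (l : List Nat) (t : Nat) :
    ((l.countP (fun k => decide (t ≤ k))) : Int) - (l.count t : Int)
      = ((l.countP (fun k => decide (t + 1 ≤ k))) : Int) := by
  induction l with
  | nil => simp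
  | cons k l ih =>
    have hc : (k :: l).countP (fun k' => decide (t ≤ k')) = l.countP (fun k' => decide (t ≤ k')) + (if t ≤ k then 1 else 0) := by
      rw [List.countP_cons]; by_cases h : t ≤ k <;> simp [h]
    have hc2 : (k :: l).countP (fun k' => decide (t + 1 ≤ k')) = l.countP (fun k' => decide (t + 1 ≤ k')) + (if t + 1 ≤ k then 1 else 0) := by
      rw [List.countP_cons]; by_cases h : t + 1 ≤ k <;> simp [h]
    have hc3 : (k :: l).count t = l.count t + (if k = t then 1 else 0) := by
      rw [List.count_cons]; by_cases h : k = t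
      · subst h; simp
      · simp [h]
    rw [hc, hc2, hc3]
    push_cast
    split_ifs <;> omega

theorem CC_succ (arr : List Int) (t : Nat) :
    CC arr t - ((ksN arr).count t : Int) = CC arr (t + 1) := by
  unfold CC
  exact countP_split (ksN arr) t

theorem CC_nonneg (arr : List Int) (t : Nat) : 0 ≤ CC arr t := by unfold CC; exact Int.natCast_nonneg _

theorem CC_pos_le (arr : List Int) (t : Nat) (h : 0 < CC arr t) : t ≤ KK arr := by
  unfold CC at h
  have : ∃ k ∈ ksN arr, t ≤ k := by
    by_contra hcon
    push Not at hcon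
    have : (ksN arr).countP (fun k => decide (t ≤ k)) = 0 := by
      apply List.countP_eq_zero.mpr
      intro k hk
      simpa using Nat.not_le.mpr (hcon k hk)
    omega
  obtain ⟨k, hk, htk⟩ := this
  exact le_trans htk ((le_foldl_max_nat (ksN arr) 0).1 k hk)

theorem CC_zero_ge (arr : List Int) (q : Nat) (h : CC arr (q + 1) = 0) : KK arr ≤ q := by
  unfold CC at h
  have h2 : (ksN arr).countP (fun k => decide (q + 1 ≤ k)) = 0 := by omega
  apply foldl_max_le_nat (ksN arr) 0 q _ (by omega)
  intro x hx
  have := List.countP_eq_zero.mp h2 x hx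
  simp at this
  omega

theorem suffix_eq (arr : List Int) : ∀ (fuel : Nat) (q : Nat) (counts : PySem.Dict Int Int),
    KK arr + 1 ≤ fuel + q →
    counts.items = (List.range q).map (fun (s : Nat) => (1 + (s : Int), CC arr (s + 1))) →
    counts.keys = PySem.List.pyRange 1 (1 + (q : Int)) 1 →
    (q = 0 ∨ 0 < CC arr q) →
    (pvSuffixLoop (PySem.Dict.counter ((ksN arr).map (fun (k : Nat) => (k : Int)))) fuel
        (CC arr (q + 1)) ((q : Int) + 1) counts).items = canon arr := by
  intro fuel
  induction fuel with
  | zero =>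
    intro q counts hfuel _ _ hinv
    exfalso
    rcases hinv with h | h
    · omega
    · have := CC_pos_le arr q h; omega
  | succ fuel ih =>
    intro q counts hfuel hitems hkeys hinv
    rw [pvSuffixLoop]
    by_cases hpos : 0 < CC arr (q + 1)
    · rw [if_pos hpos]
      have hfreq : (PySem.Dict.counter ((ksN arr).map (fun (k : Nat) => (k : Int)))).getD ((q : Int) + 1) 0
          = ((ksN arr).count (q + 1) : Int) := by
        rw [PySem.Dict.getD_counter]
        congr 1
        have : ((q : Int) + 1) = (((q + 1 : Nat) : Nat) : Int) := by push_cast; ring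
        rw [this]
        exact List.count_map_of_injective (ksN arr) _ (fun a b h => Int.natCast_inj.mp h) (q + 1)
      rw [hfreq, CC_succ]
      have hnc : counts.contains ((q : Int) + 1) = false := by
        rw [PySem.Dict.contains_eq_decide_mem_keys, hkeys]
        simp only [decide_eq_false_iff_not]
        intro hmem
        have := PySem.List.mem_pyRange_one.mp hmem
        omega
      have hitems' : (counts.insert ((q : Int) + 1) (CC arr (q + 1))).items
          = (List.range (q + 1)).map (fun (s : Nat) => (1 + (s : Int), CC arr (s + 1))) := by
        rw [PySem.Dict.items_insert_of_not_contains _ _ hnc, hitems, List.range_succ, List.map_append]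
        simp only [List.map_cons, List.map_nil]
        congr 2
        ring
      have hkeys' : (counts.insert ((q : Int) + 1) (CC arr (q + 1))).keys
          = PySem.List.pyRange 1 (1 + ((q + 1 : Nat) : Int)) 1 := by
        have : (counts.insert ((q : Int) + 1) (CC arr (q + 1))).keys = counts.keys ++ [(q : Int) + 1] := by
          have := PySem.Dict.items_insert_of_not_contains counts (CC arr (q + 1)) hnc
          simp only [PySem.Dict.keys] at *
          rw [this, List.map_append]
          rfl
        rw [this, hkeys]
        have hc : (1 : Int) + ((q + 1 : Nat) : Int) = (1 + (q : Int)) + 1 := by push_cast; ring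
        rw [hc, PySem.List.pyRange_one_succ_right (by omega)]
        congr 2
        ring
      have hs : ((q : Int) + 1) + 1 = (((q + 1 : Nat)) : Int) + 1 := by push_cast; ring
      rw [hs]
      exact ih (q + 1) _ (by omega) hitems' hkeys' (Or.inr hpos)
    · rw [if_neg (by have := CC_nonneg arr (q + 1); omega)]
      have hz : CC arr (q + 1) = 0 := by have := CC_nonneg arr (q + 1); omega
      have hqK : q = KK arr := by
        have h1 := CC_zero_ge arr q hz
        rcases hinv with h | h
        · omega
        · have := CC_pos_le arr q h; omega
      rw [hitems, canon, hqK]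

theorem B_eq_canon (shards : List Int) :
    count_all_clusters_alt shards = canon (PySem.List.sorted shards (fun x => x) false) := by
  unfold count_all_clusters_alt
  set arr := PySem.List.sorted shards (fun x => x) false with harr
  simp only []
  have hsort : arr.Pairwise (· ≤ ·) := by
    have := PySem.List.sorted_pairwise shards (fun x => x)
    simpa [harr] using this
  rw [PySem.List.foldl_append_singleton_eq_map (pvClusterLen arr (arr.length : Int))
        (PySem.List.pyRange 0 (arr.length : Int) 1) [], List.nil_append]
  have hks : (PySem.List.pyRange 0 (arr.length : Int) 1).map (pvClusterLen arr (arr.length : Int))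
      = (ksN arr).map (fun (k : Nat) => (k : Int)) := by
    rw [PySem.List.pyRange_one 0 (arr.length : Int), List.map_map,
        show (((arr.length : Int)) - 0).toNat = arr.length by omega, ksN, List.map_map]
    apply List.map_congr_left
    intro i hmem
    have hi : i < arr.length := List.mem_range.mp hmem
    simp only [Function.comp_apply, zero_add]
    exact ks_elem arr hsort i hi
  rw [hks]
  have hn : ((arr.length : Nat) : Int) = CC arr (0 + 1) := by
    unfold CC
    have : (ksN arr).countP (fun k => decide (0 + 1 ≤ k)) = (ksN arr).length := by
      apply List.countP_eq_length.mpr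
      intro k hk
      obtain ⟨i, _, rfl⟩ := List.mem_map.mp hk
      exact decide_eq_true (by have := kN_pos arr i; omega)
    rw [this, ksN, List.length_map, List.length_range]
  have hone : (1 : Int) = ((0 : Nat) : Int) + 1 := by norm_num
  rw [hn, hone]
  apply suffix_eq arr (arr.length + 1) 0 PySem.Dict.empty
  · have hle : KK arr ≤ arr.length := by
      apply foldl_max_le_nat (ksN arr) 0 arr.length _ (by omega)
      intro x hx
      obtain ⟨i, hi, rfl⟩ := List.mem_map.mp hx
      exact kN_le arr i (List.mem_range.mp hi)
    omega
  · simp [PySem.Dict.empty]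
  · simp [PySem.Dict.empty, PySem.Dict.keys]
  · exact Or.inl rfl

-- ===== VERDICT (by name: the statement is the Claim_ definition above) =====
theorem count_all_clusters_spec : Claim_equal_count_all_clusters := by
  intro shards _
  unfold Spec_count_all_clusters
  rw [A_eq_canon, B_eq_canon]
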